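-- pv_equiv track=rewrite | github.com/rokobo/Productivity-autotracker | src/helper_io.py | format_deck
-- ===== SOURCE A (Python) =====
-- def format_deck(lines: list, deck_name: str) -> list:
--     """
--     Format the lines of a deck into a list of card tuples.
--
--     Args:
--         lines (list): Lines of the deck file.
--         deck_name (str): Name of the deck.
--
--     Returns:
--         list: List of tuples (question, answer, deck name).
--     """
--     data = []
--     current_header = None
--     current_content = []
--     for line in lines:
--         if line.startswith('#'):
--             if current_header is not None:
--                 data.append((
--                     current_header[1:].strip(),
--                     ''.join(current_content).strip(), deck_name
--                 ))
--                 current_content = []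
--             current_header = line.strip()
--         elif current_header is not None:
--             current_content.append(line)
--
--     if current_header is not None:
--         data.append((
--             current_header[1:].strip(),
--             ''.join(current_content).strip(), deck_name
--         ))
--     return data
-- ===== SOURCE B (Python) =====
-- def format_deck(lines: list, deck_name: str) -> list:
--     """
--     Format the lines of a deck into a list of card tuples.
--
--     Chunk-based rewrite: find each header line and the span of body lines
--     that follows it, emitting one card per chunk.
--     """
--     n = len(lines)
--     cards = []
--     i = 0
--     while i < n and not lines[i].startswith('#'):
--         i += 1  # lines before the first header are discarded
--     while i < n:
--         j = i + 1
--         while j < n and not lines[j].startswith('#'):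
--             j += 1
--         cards.append((lines[i].strip()[1:].strip(),
--                       ''.join(lines[i + 1:j]).strip(),
--                       deck_name))
--         i = j
--     return cards
-- ===== Notes on version B (the rewrite author's own statement) =====
-- stated objective: alternative
-- what changed: Replaces A's single-pass accumulator state machine (current header + growing content buffer) by a chunk scanner that locates each header line and the index span of its body, slicing the body out of the list per card.
import Mathlib
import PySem

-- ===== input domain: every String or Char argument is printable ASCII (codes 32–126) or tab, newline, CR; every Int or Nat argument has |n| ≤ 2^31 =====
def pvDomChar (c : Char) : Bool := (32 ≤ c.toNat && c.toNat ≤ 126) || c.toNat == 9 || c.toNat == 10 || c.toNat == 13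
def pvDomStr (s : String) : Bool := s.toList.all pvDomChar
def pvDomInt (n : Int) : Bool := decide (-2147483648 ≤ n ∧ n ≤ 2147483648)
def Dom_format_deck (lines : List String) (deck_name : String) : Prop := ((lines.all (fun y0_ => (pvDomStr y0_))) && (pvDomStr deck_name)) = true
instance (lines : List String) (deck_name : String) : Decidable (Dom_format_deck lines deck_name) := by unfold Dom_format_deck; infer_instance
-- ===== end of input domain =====

-- B is an alternative chunk-scanning implementation (header spans located by index);
-- the equivalence is about the return value (neither program mutates its arguments).

-- ===== PORT A =====
-- A's loop body: state = (data, current_header, current_content)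
def fdStepA (deck_name : String)
    (st : List (String × String × String) × Option String × List String)
    (line : String) : List (String × String × String) × Option String × List String :=
  match st with
  | (data, currentHeader, currentContent) =>
    if PySem.Str.startswith line "#" then
      match currentHeader with
      | some h =>
          (data ++ [(PySem.Str.strip (PySem.Str.slice h (some 1) none),
                     PySem.Str.strip (PySem.Str.join "" currentContent), deck_name)],
           some (PySem.Str.strip line), ([] : List String))
      | none => (data, some (PySem.Str.strip line), currentContent)
    else
      match currentHeader with
      | some _ => (data, currentHeader, currentContent ++ [line])
      | none => (data, currentHeader, currentContent)

-- A's trailing flush after the loop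
def fdFinA (deck_name : String)
    (st : List (String × String × String) × Option String × List String) :
    List (String × String × String) :=
  match st with
  | (data, some h, currentContent) =>
      data ++ [(PySem.Str.strip (PySem.Str.slice h (some 1) none),
                PySem.Str.strip (PySem.Str.join "" currentContent), deck_name)]
  | (data, none, _) => data

def format_deck (lines : List String) (deck_name : String) : List (String × String × String) :=
  fdFinA deck_name (lines.foldl (fdStepA deck_name) ([], none, []))

-- ===== PORT B =====
-- inner scan: advance i while i < n and lines[i] does not start with '#'
-- (lines.getD i "" is exact for lines[i] here: the guard keeps i < n = lines.length)
def fdSkip (lines : List String) (n i : Nat) : Nat :=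
  if i < n ∧ PySem.Str.startswith (lines.getD i "") "#" = false then
    fdSkip lines n (i + 1)
  else i
termination_by n - i
decreasing_by omega

theorem fdSkip_ge (lines : List String) (n i : Nat) : i ≤ fdSkip lines n i := by
  unfold fdSkip
  split
  · exact Nat.le_trans (Nat.le_succ i) (fdSkip_ge lines n (i + 1))
  · exact Nat.le_refl i
termination_by n - i
decreasing_by omega

-- main scan: i is at a header (or past the end); j = start of the next chunk
def fdLoop (lines : List String) (deck_name : String) (n i : Nat) :
    List (String × String × String) :=
  if h : i < n then
    (PySem.Str.strip (PySem.Str.slice (PySem.Str.strip (lines.getD i "")) (some 1) none),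
     PySem.Str.strip (PySem.Str.join ""
       (PySem.List.slice lines (some ((i : Int) + 1)) (some (fdSkip lines n (i + 1) : Int)))),
     deck_name) :: fdLoop lines deck_name n (fdSkip lines n (i + 1))
  else []
termination_by n - i
decreasing_by have := fdSkip_ge lines n (i + 1); omega

def format_deck_alt (lines : List String) (deck_name : String) :
    List (String × String × String) :=
  fdLoop lines deck_name lines.length (fdSkip lines lines.length 0)

-- ===== PRECONDITION & SPEC =====
def Spec_format_deck (lines : List String) (deck_name : String) (out : List (String × String × String)) : Prop := out = format_deck_alt lines deck_name
instance (lines : List String) (deck_name : String) (out : List (String × String × String)) : Decidable (Spec_format_deck lines deck_name out) := by unfold Spec_format_deck; infer_instance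

-- ===== CLAIM (what is proved, stated in full; the proofs are below) =====
def Claim_equal_format_deck : Prop := ∀ (lines : List String) (deck_name : String), Dom_format_deck lines deck_name → Spec_format_deck lines deck_name (format_deck lines deck_name)

-- ===== LEMMAS AND PROOFS =====

-- a line is a "body" line iff it does not start with '#'
def fdBody (l : String) : Bool := !PySem.Str.startswith l "#"

-- the card emitted for a (raw header line, body lines) chunk
def fdCard (deck_name : String) (h : String) (c : List String) : String × String × String :=
  (PySem.Str.strip (PySem.Str.slice (PySem.Str.strip h) (some 1) none),
   PySem.Str.strip (PySem.Str.join "" c), deck_name)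

-- the card A emits from an already-stripped stored header
def fdCard' (deck_name : String) (h : String) (c : List String) : String × String × String :=
  (PySem.Str.strip (PySem.Str.slice h (some 1) none),
   PySem.Str.strip (PySem.Str.join "" c), deck_name)

-- reference decomposition: (header line, following body lines) chunks
def fdChunks : List String → List (String × List String)
  | [] => []
  | l :: ls =>
    if PySem.Str.startswith l "#" then
      (l, ls.takeWhile fdBody) :: fdChunks (ls.dropWhile fdBody)
    else fdChunks ls
termination_by ls => ls.length
decreasing_by
  · have := List.length_dropWhile_le fdBody ls; simp; omega
  · simp

theorem fdA_some (deck_name : String) (ls : List String) :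
    ∀ (data : List (String × String × String)) (h : String) (c : List String),
    fdFinA deck_name (ls.foldl (fdStepA deck_name) (data, some h, c)) =
      data ++ fdCard' deck_name h (c ++ ls.takeWhile fdBody) ::
        (fdChunks (ls.dropWhile fdBody)).map (fun pc => fdCard deck_name pc.1 pc.2) := by
  induction ls with
  | nil => intro data h c; simp [fdFinA, fdChunks, fdCard']
  | cons l ls ih =>
    intro data h c
    by_cases hl : PySem.Str.startswith l "#"
    · simp only [List.foldl_cons, fdStepA, hl, if_pos]
      rw [ih]
      have hl' : PySem.Chars.startswith l.toList ['#'] = true := by simpa using hl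
      simp [fdChunks, hl', List.takeWhile_cons, List.dropWhile_cons, fdBody,
        fdCard, fdCard']
    · simp only [List.foldl_cons, fdStepA, hl, Bool.false_eq_true, if_false]
      rw [ih]
      have hl' : PySem.Chars.startswith l.toList ['#'] = false := by
        simpa using hl
      simp [List.takeWhile_cons, List.dropWhile_cons, fdBody, hl',
        List.append_assoc]

theorem fdA_none (deck_name : String) (ls : List String) :
    ∀ (data : List (String × String × String)),
    fdFinA deck_name (ls.foldl (fdStepA deck_name) (data, none, [])) =
      data ++ (fdChunks ls).map (fun pc => fdCard deck_name pc.1 pc.2) := by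
  induction ls with
  | nil => intro data; simp [fdFinA, fdChunks]
  | cons l ls ih =>
    intro data
    by_cases hl : PySem.Str.startswith l "#"
    · simp only [List.foldl_cons, fdStepA, hl, if_pos]
      rw [fdA_some]
      have hl' : PySem.Chars.startswith l.toList ['#'] = true := by simpa using hl
      simp [fdChunks, hl', fdCard, fdCard']
    · simp only [List.foldl_cons, fdStepA, hl, Bool.false_eq_true, if_false]
      rw [ih]
      have hl' : PySem.Chars.startswith l.toList ['#'] = false := by simpa using hl
      simp [fdChunks, hl']

theorem format_deck_eq_chunks (lines : List String) (deck_name : String) :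
    format_deck lines deck_name =
      (fdChunks lines).map (fun pc => fdCard deck_name pc.1 pc.2) := by
  unfold format_deck
  simpa using fdA_none deck_name lines []

theorem fdSkip_eq (lines : List String) (i : Nat) (hi : i ≤ lines.length) :
    fdSkip lines lines.length i = i + ((lines.drop i).takeWhile fdBody).length := by
  unfold fdSkip
  split
  · next h =>
    obtain ⟨hlt, hns⟩ := h
    rw [fdSkip_eq lines (i + 1) (by omega)]
    rw [List.drop_eq_getElem_cons hlt, List.takeWhile_cons]
    have hgd : lines.getD i "" = lines[i] := List.getD_eq_getElem lines "" hlt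
    have hns' : PySem.Chars.startswith lines[i].toList ['#'] = false := by
      simpa using hgd ▸ hns
    simp [fdBody, hns']
    omega
  · next h =>
    by_cases hlt : i < lines.length
    · have hns : PySem.Str.startswith (lines.getD i "") "#" = true := by
        by_contra h'
        exact h ⟨hlt, by simpa using h'⟩
      rw [List.drop_eq_getElem_cons hlt, List.takeWhile_cons]
      have hgd : lines.getD i "" = lines[i] := List.getD_eq_getElem lines "" hlt
      have hns' : PySem.Chars.startswith lines[i].toList ['#'] = true := by
        simpa using hgd ▸ hns
      simp [fdBody, hns']
    · have : i = lines.length := by omega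
      simp [this]
termination_by lines.length - i
decreasing_by omega

-- drop past the takeWhile prefix is the dropWhile suffix
theorem drop_length_takeWhile {α : Type} (p : α → Bool) (l : List α) :
    l.drop (l.takeWhile p).length = l.dropWhile p := by
  induction l with
  | nil => rfl
  | cons a l ih =>
    by_cases h : p a
    · simp [List.takeWhile_cons, List.dropWhile_cons, h, ih]
    · simp [List.takeWhile_cons, List.dropWhile_cons, h]

-- take of the takeWhile length is takeWhile itself
theorem take_length_takeWhile {α : Type} (p : α → Bool) (l : List α) :
    l.take (l.takeWhile p).length = l.takeWhile p := by
  induction l with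
  | nil => rfl
  | cons a l ih =>
    by_cases h : p a
    · simp [List.takeWhile_cons, h, ih]
    · simp [List.takeWhile_cons, h]

-- the element after a dropWhile fails the predicate
theorem dropWhile_head_not {α : Type} (p : α → Bool) (l : List α) (x : α) (xs : List α)
    (h : l.dropWhile p = x :: xs) : p x = false := by
  induction l with
  | nil => simp at h
  | cons a l ih =>
    rw [List.dropWhile_cons] at h
    split at h
    · exact ih h
    · next hp =>
      injection h with h1 h2
      subst h1
      simpa using hp

theorem fdLoop_eq_chunks (lines : List String) (deck_name : String) (i : Nat)
    (hi : i ≤ lines.length)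
    (hh : i = lines.length ∨ PySem.Str.startswith (lines.getD i "") "#" = true) :
    fdLoop lines deck_name lines.length i =
      (fdChunks (lines.drop i)).map (fun pc => fdCard deck_name pc.1 pc.2) := by
  unfold fdLoop
  split
  · next hlt =>
    have hhd : PySem.Str.startswith (lines.getD i "") "#" = true := by
      rcases hh with h | h
      · omega
      · exact h
    have hgd : lines.getD i "" = lines[i] := List.getD_eq_getElem lines "" hlt
    have hj : fdSkip lines lines.length (i + 1) =
        (i + 1) + ((lines.drop (i + 1)).takeWhile fdBody).length :=
      fdSkip_eq lines (i + 1) (by omega)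
    have hjle : fdSkip lines lines.length (i + 1) ≤ lines.length := by
      have := (List.takeWhile_prefix (l := lines.drop (i + 1)) (p := fdBody)).length_le
      simp at this
      omega
    -- the sliced body equals the takeWhile prefix
    have hslice : PySem.List.slice lines (some ((i : Int) + 1))
        (some ((fdSkip lines lines.length (i + 1) : Nat) : Int)) =
        (lines.drop (i + 1)).takeWhile fdBody := by
      have hc : ((i : Int) + 1) = (((i + 1 : Nat) : Int)) := by push_cast; ring
      rw [hc, PySem.List.slice_natCast, hj]
      have he : (i + 1) + ((lines.drop (i + 1)).takeWhile fdBody).length - (i + 1) =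
          ((lines.drop (i + 1)).takeWhile fdBody).length := by omega
      rw [he, take_length_takeWhile]
    -- the continuation point is the dropWhile suffix
    have hdropj : lines.drop (fdSkip lines lines.length (i + 1)) =
        (lines.drop (i + 1)).dropWhile fdBody := by
      rw [hj, ← List.drop_drop, drop_length_takeWhile]
    have hrec : fdLoop lines deck_name lines.length (fdSkip lines lines.length (i + 1)) =
        (fdChunks ((lines.drop (i + 1)).dropWhile fdBody)).map
          (fun pc => fdCard deck_name pc.1 pc.2) := by
      rw [← hdropj]
      apply fdLoop_eq_chunks lines deck_name _ hjle
      by_cases hje : fdSkip lines lines.length (i + 1) = lines.length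
      · exact Or.inl hje
      · right
        have hjlt : fdSkip lines lines.length (i + 1) < lines.length := by omega
        have hcons : (lines.drop (i + 1)).dropWhile fdBody =
            lines[fdSkip lines lines.length (i + 1)] ::
              lines.drop (fdSkip lines lines.length (i + 1) + 1) := by
          rw [← hdropj, List.drop_eq_getElem_cons hjlt]
        have hhd' := dropWhile_head_not fdBody _ _ _ hcons
        simp [fdBody] at hhd'
        rw [List.getD_eq_getElem lines "" hjlt]
        simpa using hhd'
    rw [hrec, hslice]
    conv_rhs => rw [List.drop_eq_getElem_cons hlt]
    rw [fdChunks]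
    have hhd2 : PySem.Str.startswith lines[i] "#" = true := hgd ▸ hhd
    simp only [hhd2, if_pos, List.map_cons]
    rw [hgd]
    rfl
  · next hlt =>
    have : i = lines.length := by omega
    simp [this, fdChunks]
termination_by lines.length - i
decreasing_by have := fdSkip_ge lines lines.length (i + 1); omega

-- chunks ignore a body-line prefix
theorem fdChunks_dropWhile (ls : List String) :
    fdChunks (ls.dropWhile fdBody) = fdChunks ls := by
  induction ls with
  | nil => rfl
  | cons l ls ih =>
    by_cases hl : PySem.Str.startswith l "#"
    · have hl' : PySem.Chars.startswith l.toList ['#'] = true := by simpa using hl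
      simp [List.dropWhile_cons, fdBody, hl']
    · have hl' : PySem.Chars.startswith l.toList ['#'] = false := by simpa using hl
      have hlf : PySem.Str.startswith l "#" = false := by simpa using hl
      rw [List.dropWhile_cons]
      simp only [fdBody, hlf, Bool.not_false, if_pos]
      rw [ih]
      conv_rhs => rw [fdChunks]
      simp [hl']

theorem format_deck_alt_eq_chunks (lines : List String) (deck_name : String) :
    format_deck_alt lines deck_name =
      (fdChunks lines).map (fun pc => fdCard deck_name pc.1 pc.2) := by
  unfold format_deck_alt
  have h0 : fdSkip lines lines.length 0 = (lines.takeWhile fdBody).length := by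
    simpa using fdSkip_eq lines 0 (Nat.zero_le _)
  have hle : fdSkip lines lines.length 0 ≤ lines.length := by
    have := (List.takeWhile_prefix (l := lines) (p := fdBody)).length_le
    omega
  have hdrop : lines.drop (fdSkip lines lines.length 0) = lines.dropWhile fdBody := by
    rw [h0, drop_length_takeWhile]
  have hcond : fdSkip lines lines.length 0 = lines.length ∨
      PySem.Str.startswith (lines.getD (fdSkip lines lines.length 0) "") "#" = true := by
    by_cases he : fdSkip lines lines.length 0 = lines.length
    · exact Or.inl he
    · right
      have hlt : fdSkip lines lines.length 0 < lines.length := by omega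
      have hcons : lines.dropWhile fdBody =
          lines[fdSkip lines lines.length 0] ::
            lines.drop (fdSkip lines lines.length 0 + 1) := by
        rw [← hdrop, List.drop_eq_getElem_cons hlt]
      have hhead := dropWhile_head_not fdBody _ _ _ hcons
      simp [fdBody] at hhead
      rw [List.getD_eq_getElem lines "" hlt]
      simpa using hhead
  rw [fdLoop_eq_chunks lines deck_name _ hle hcond, hdrop, fdChunks_dropWhile]

-- ===== VERDICT (by name: the statement is the Claim_ definition above) =====
theorem format_deck_spec : Claim_equal_format_deck := by
  intro lines deck_name _
  unfold Spec_format_deck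
  rw [format_deck_eq_chunks, format_deck_alt_eq_chunks]
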